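-- pv_equiv track=rewrite | github.com/sdevisch/orxaq-ops | src/orxaq_autonomy/router.py | _resolve_lane_providers
-- ===== SOURCE A (Python) =====
-- from typing import Any
--
-- def _resolve_lane_providers(payload: dict[str, Any], lane: str | None) -> list[str]:
--     lanes = payload.get("lanes", {})
--     if not isinstance(lanes, dict):
--         return []
--     if lane:
--         values = lanes.get(lane, [])
--         return [str(item).strip() for item in values if str(item).strip()] if isinstance(values, list) else []
--     router_cfg = payload.get("router", {})
--     fallback = []
--     if isinstance(router_cfg, dict):
--         fallback_raw = router_cfg.get("fallback_order", [])
--         if isinstance(fallback_raw, list):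
--             fallback = [str(item).strip() for item in fallback_raw if str(item).strip()]
--     order = fallback or [str(name).strip() for name in lanes.keys()]
--     names: list[str] = []
--     for lane_name in order:
--         values = lanes.get(lane_name, [])
--         if not isinstance(values, list):
--             continue
--         for item in values:
--             name = str(item).strip()
--             if name and name not in names:
--                 names.append(name)
--     return names
-- ===== SOURCE B (Python) =====
-- def _clean(values):
--     return [str(item).strip() for item in values if str(item).strip()]
--
--
-- def _resolve_lane_providers(payload, lane):
--     lanes = payload.get("lanes", {})
--     if not isinstance(lanes, dict):
--         return []
--     if lane:
--         values = lanes.get(lane, [])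
--         return _clean(values) if isinstance(values, list) else []
--     router_cfg = payload.get("router", {})
--     fallback_raw = router_cfg.get("fallback_order", []) if isinstance(router_cfg, dict) else []
--     fallback = _clean(fallback_raw) if isinstance(fallback_raw, list) else []
--     order = fallback or [str(name).strip() for name in lanes]
--     flat = []
--     for lane_name in order:
--         values = lanes.get(lane_name, [])
--         if isinstance(values, list):
--             flat += _clean(values)
--     # keep each name only at its first-occurrence position: no seen-accumulator
--     return [x for i, x in enumerate(flat) if flat.index(x) == i]
-- ===== Notes on version B (the rewrite author's own statement) =====
-- stated objective: alternative
-- what changed: A's interleaved append-if-absent dedup (a names accumulator with a membership scan per item, inside the nested lane loop) is replaced by gathering all cleaned names into one flat list and then a positional first-occurrence filter (keep x at index i iff flat.index(x) == i), with no accumulator or seen structure at all.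
import Mathlib
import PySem

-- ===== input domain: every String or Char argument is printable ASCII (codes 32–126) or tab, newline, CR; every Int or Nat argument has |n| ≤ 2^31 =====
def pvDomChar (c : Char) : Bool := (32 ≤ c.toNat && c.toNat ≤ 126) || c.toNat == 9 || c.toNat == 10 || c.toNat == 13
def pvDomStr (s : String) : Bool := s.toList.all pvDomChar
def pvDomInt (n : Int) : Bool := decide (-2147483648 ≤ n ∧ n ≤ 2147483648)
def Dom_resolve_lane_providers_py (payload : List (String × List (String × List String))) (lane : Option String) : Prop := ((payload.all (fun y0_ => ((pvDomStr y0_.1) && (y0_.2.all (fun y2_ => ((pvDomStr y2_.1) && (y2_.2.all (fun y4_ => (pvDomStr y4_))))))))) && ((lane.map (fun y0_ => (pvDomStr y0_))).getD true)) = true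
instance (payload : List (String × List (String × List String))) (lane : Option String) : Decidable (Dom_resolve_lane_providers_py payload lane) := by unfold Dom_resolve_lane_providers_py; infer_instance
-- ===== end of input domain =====

-- B gathers all cleaned names into one flat list and dedups by a positional
-- first-occurrence filter (keep x at index i iff flat.index(x) == i), with no
-- seen-accumulator; objective: alternative. (The isinstance guards of the Python
-- are statically true under the Lean types and are therefore omitted in both ports.)

-- ===== PORT A =====
def resolve_lane_providers_py (payload : List (String × List (String × List String))) (lane : Option String) : List String :=
  let lanes := (PySem.Dict.ofList payload).getD "lanes" []
  -- `if lane:` — truthy iff lane is a non-empty string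
  if (match lane with | some l => decide (l ≠ "") | none => false) = true then
    let values := (PySem.Dict.ofList lanes).getD (lane.getD "") []
    (values.map PySem.Str.strip).filter (fun n => n ≠ "")
  else
    let router_cfg := (PySem.Dict.ofList payload).getD "router" []
    let fallback_raw := (PySem.Dict.ofList router_cfg).getD "fallback_order" []
    let fallback := (fallback_raw.map PySem.Str.strip).filter (fun n => n ≠ "")
    let order := if fallback ≠ [] then fallback else (PySem.Dict.ofList lanes).keys.map PySem.Str.strip
    order.foldl (fun names lane_name =>
      let values := (PySem.Dict.ofList lanes).getD lane_name []
      values.foldl (fun names item =>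
        let name := PySem.Str.strip item
        if name ≠ "" ∧ name ∉ names then names ++ [name] else names) names) []

-- ===== PORT B =====
def pvClean (values : List String) : List String :=
  (values.map PySem.Str.strip).filter (fun n => n ≠ "")

def resolve_lane_providers_py_alt (payload : List (String × List (String × List String))) (lane : Option String) : List String :=
  let lanes := (PySem.Dict.ofList payload).getD "lanes" []
  if (match lane with | some l => decide (l ≠ "") | none => false) = true then
    pvClean ((PySem.Dict.ofList lanes).getD (lane.getD "") [])
  else
    let fallback := pvClean ((PySem.Dict.ofList ((PySem.Dict.ofList payload).getD "router" [])).getD "fallback_order" [])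
    let order := if fallback ≠ [] then fallback else (PySem.Dict.ofList lanes).keys.map PySem.Str.strip
    let flat := order.foldl (fun flat lane_name => flat ++ pvClean ((PySem.Dict.ofList lanes).getD lane_name [])) []
    ((PySem.List.enumerate flat 0).filter
      (fun p => (PySem.List.index? flat p.2).map (fun n => (n : Int)) == some p.1)).map Prod.snd

-- ===== PRECONDITION & SPEC =====
def Spec_resolve_lane_providers_py (payload : List (String × List (String × List String))) (lane : Option String) (out : List String) : Prop := out = resolve_lane_providers_py_alt payload lane
instance (payload : List (String × List (String × List String))) (lane : Option String) (out : List String) : Decidable (Spec_resolve_lane_providers_py payload lane out) := by unfold Spec_resolve_lane_providers_py; infer_instance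

-- ===== CLAIM (what is proved, stated in full; the proofs are below) =====
def Claim_equal_resolve_lane_providers_py : Prop := ∀ (payload : List (String × List (String × List String))) (lane : Option String), Dom_resolve_lane_providers_py payload lane → Spec_resolve_lane_providers_py payload lane (resolve_lane_providers_py payload lane)

-- ===== LEMMAS AND PROOFS =====

-- A's inner loop over one lane's items equals folding Set.add over the cleaned items.
lemma inner_loop_eq_set_fold (values : List String) (ns : List String) :
    values.foldl (fun names item =>
        let name := PySem.Str.strip item
        if name ≠ "" ∧ name ∉ names then names ++ [name] else names) ns
      = (pvClean values).foldl PySem.Set.add ns := by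
  induction values generalizing ns with
  | nil => simp [pvClean]
  | cons v vs ih =>
    simp only [pvClean, List.map_cons, List.filter_cons, List.foldl_cons]
    by_cases hv : PySem.Str.strip v = ""
    · simp [hv, ih, pvClean]
    · simp only [hv, ne_eq, not_false_eq_true, true_and, decide_true, if_true,
        List.foldl_cons, ih, pvClean, PySem.Set.add]
      by_cases hm : PySem.Str.strip v ∈ ns
      · simp [hm]
      · simp [hm]

-- folding a per-lane fold over order is the fold over the flattened gather
lemma foldl_flatMap_eq {α β γ : Type} (g : γ → β → γ) (f : α → List β) (l : List α) (init : γ) :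
    (l.flatMap f).foldl g init = l.foldl (fun a x => (f x).foldl g a) init := by
  induction l generalizing init with
  | nil => simp
  | cons x xs ih => simp [List.flatMap_cons, List.foldl_append, ih]

-- the ordered dedup of a list IS its positional first-occurrence filter
lemma dedup_eq_first_idx_filter (l : List String) :
    PySem.List.dedup l
      = ((PySem.List.enumerate l 0).filter
          (fun p => (PySem.List.index? l p.2).map (fun n => (n : Int)) == some p.1)).map Prod.snd := by
  induction l using List.reverseRecOn with
  | nil => rfl
  | append_singleton xs a ih =>
    rw [PySem.List.enumerate_append, List.filter_append, List.map_append]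
    have hfc : (PySem.List.enumerate xs 0).filter
        (fun p => (PySem.List.index? (xs ++ [a]) p.2).map (fun n => (n : Int)) == some p.1)
        = (PySem.List.enumerate xs 0).filter
        (fun p => (PySem.List.index? xs p.2).map (fun n => (n : Int)) == some p.1) := by
      apply List.filter_congr
      intro p hp
      have hmem : p.2 ∈ xs := by
        rcases (PySem.List.mem_enumerate_iff xs 0 p).mp hp with ⟨k, hk, rfl⟩
        simp
      rw [PySem.List.index?_append_of_mem _ hmem]
    rw [hfc, ← ih]
    have hsingle : PySem.List.enumerate [a] (0 + (xs.length : Int)) = [((xs.length : Int), a)] := by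
      simp [PySem.List.enumerate_cons, PySem.List.enumerate_nil]
    rw [hsingle]
    by_cases hmem : a ∈ xs
    · -- the trailing copy is dropped by the filter and by dedup
      have hidx : PySem.List.index? (xs ++ [a]) a = PySem.List.index? xs a :=
        PySem.List.index?_append_of_mem _ hmem
      obtain ⟨k, hk⟩ := Option.isSome_iff_exists.mp
        ((PySem.List.index?_isSome_iff xs a).mpr hmem)
      obtain ⟨hklt, -, -⟩ := PySem.List.getElem_of_index?_eq_some hk
      have hne : ((k : Int)) ≠ (xs.length : Int) := by exact_mod_cast Nat.ne_of_lt hklt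
      have hin : a ∈ PySem.Set.ofList xs := (PySem.Set.mem_ofList xs a).mpr hmem
      have hdedup : PySem.List.dedup (xs ++ [a]) = PySem.List.dedup xs := by
        rw [PySem.List.dedup_eq_ofList, PySem.Set.ofList_eq_foldl, List.foldl_append,
          ← PySem.Set.ofList_eq_foldl, List.foldl_cons, List.foldl_nil,
          PySem.List.dedup_eq_ofList]
        simp [PySem.Set.add, PySem.Set.contains, hin]
      rw [hdedup]
      simp only [List.filter_cons, List.filter_nil]
      rw [hidx, hk]
      simp [hne]
    · -- fresh element: kept at the end by both sides
      have hout : a ∉ PySem.Set.ofList xs := fun h => hmem ((PySem.Set.mem_ofList xs a).mp h)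
      have hdedup : PySem.List.dedup (xs ++ [a]) = PySem.List.dedup xs ++ [a] := by
        rw [PySem.List.dedup_eq_ofList, PySem.Set.ofList_eq_foldl, List.foldl_append,
          ← PySem.Set.ofList_eq_foldl, List.foldl_cons, List.foldl_nil,
          PySem.List.dedup_eq_ofList]
        simp [PySem.Set.add, PySem.Set.contains, hout]
      rw [hdedup]
      simp only [List.filter_cons, List.filter_nil]
      rw [PySem.List.index?_append_singleton_self xs a hmem]
      simp

-- A's whole nested loop equals B's gather-then-positional-filter
lemma loop_eq_first_idx (lanes : List (String × List String)) (order : List String) :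
    order.foldl (fun names lane_name =>
        let values := (PySem.Dict.ofList lanes).getD lane_name []
        values.foldl (fun names item =>
          let name := PySem.Str.strip item
          if name ≠ "" ∧ name ∉ names then names ++ [name] else names) names) []
      = (let flat := order.foldl (fun flat lane_name => flat ++ pvClean ((PySem.Dict.ofList lanes).getD lane_name [])) []
         ((PySem.List.enumerate flat 0).filter
           (fun p => (PySem.List.index? flat p.2).map (fun n => (n : Int)) == some p.1)).map Prod.snd) := by
  have hflat : order.foldl (fun flat lane_name => flat ++ pvClean ((PySem.Dict.ofList lanes).getD lane_name [])) []
      = order.flatMap (fun lane_name => pvClean ((PySem.Dict.ofList lanes).getD lane_name [])) := by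
    simpa using PySem.List.foldl_append_eq_flatMap
      (fun lane_name => pvClean ((PySem.Dict.ofList lanes).getD lane_name [])) order ([] : List String)
  simp only [hflat]
  rw [← dedup_eq_first_idx_filter, PySem.List.dedup_eq_ofList, PySem.Set.ofList_eq_foldl,
    foldl_flatMap_eq]
  congr 1
  funext ns ln
  exact inner_loop_eq_set_fold _ ns

-- ===== VERDICT (by name: the statement is the Claim_ definition above) =====
theorem resolve_lane_providers_py_spec : Claim_equal_resolve_lane_providers_py := by
  intro payload lane _
  unfold Spec_resolve_lane_providers_py resolve_lane_providers_py resolve_lane_providers_py_alt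
  simp only [pvClean]
  split
  all_goals split
  · rfl
  · exact loop_eq_first_idx _ _
  · rfl
  · exact loop_eq_first_idx _ _
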